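-- pv_equiv track=rewrite | github.com/pi-314159/Lie-Algebra-Cohomology-of-Hamiltonian-Vector-Fields | 0-h2/compute.py | GenPair
-- ===== SOURCE A (Python) =====
-- import itertools
--
-- def GenPair(length, sumTo, start, end):
--     # Generates all combinations of size `length` which sum to `sumTo`.
--     temp = list(filter(lambda x: sum(x) == sumTo, itertools.product(range(start, end + 1), repeat = length)))
--     possiblePairs = []
--     # Creates \mathbb Z \times \mathbb Z grading.
--     for a in temp:
--         for A in temp:
--             b = sorted([[1 - x, 1 - y] for x, y in zip(a, A)], reverse = True)
--             # (0, 0) does not exist, so we are not going to consider it.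
--             # We also do not need repeated pairs.
--             if ([0, 0] not in b) and (b not in possiblePairs):
--                 i = 0
--                 for B in b:
--                     # If a term is repeated, then the wedge product is 0;
--                     # thus, we will ignore pairs with repeated terms.
--                     if b.count(B) > 1:
--                         i = 1
--                         break
--                 if i == 0:
--                     possiblePairs.append(b)
--     return possiblePairs
--
-- i = True
-- ===== SOURCE B (Python) =====
-- def GenPair(length, sumTo, start, end):
--     # Iterative pruned frontier: each entry is (remaining sum, reversed prefix as a
--     # shared (value, parent) chain); a value v is kept only if the remaining sum can
--     # still be reached by the positions left.
--     frontier = [(sumTo, None)]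
--     for j in range(length):
--         left = length - 1 - j
--         frontier = [(rem - v, (v, chain))
--                     for (rem, chain) in frontier
--                     for v in range(start, end + 1)
--                     if left * start <= rem - v <= left * end]
--     temp = []
--     for rem, chain in frontier:
--         if rem == 0:
--             t = []
--             while chain is not None:
--                 t.append(chain[0])
--                 chain = chain[1]
--             t.reverse()
--             temp.append(t)
--     seen = set()
--     out = []
--     for a in temp:
--         for A in temp:
--             b = sorted([[1 - x, 1 - y] for x, y in zip(a, A)], reverse=True)
--             key = tuple(map(tuple, b))  # hashable mirror of b
--             if key in seen:
--                 continue
--             seen.add(key)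
--             # keep b only if (0, 0) is absent and no grading repeats
--             if [0, 0] not in b and len(set(key)) == len(b):
--                 out.append(b)
--     return out
-- ===== Notes on version B (the rewrite author's own statement) =====
-- stated objective: alternative
-- what changed: B enumerates the summing tuples with an iterative pruned frontier (remaining sum threaded, shared reversed-prefix chains) instead of filtering the full Cartesian product, and replaces A's linear 'b not in possiblePairs' scan per generated pair with a hash seen-set.
-- outside the precondition, e.g. on GenPair(-1, 0, 0, 1): A raises ValueError, B returns [[]]
import Mathlib
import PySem

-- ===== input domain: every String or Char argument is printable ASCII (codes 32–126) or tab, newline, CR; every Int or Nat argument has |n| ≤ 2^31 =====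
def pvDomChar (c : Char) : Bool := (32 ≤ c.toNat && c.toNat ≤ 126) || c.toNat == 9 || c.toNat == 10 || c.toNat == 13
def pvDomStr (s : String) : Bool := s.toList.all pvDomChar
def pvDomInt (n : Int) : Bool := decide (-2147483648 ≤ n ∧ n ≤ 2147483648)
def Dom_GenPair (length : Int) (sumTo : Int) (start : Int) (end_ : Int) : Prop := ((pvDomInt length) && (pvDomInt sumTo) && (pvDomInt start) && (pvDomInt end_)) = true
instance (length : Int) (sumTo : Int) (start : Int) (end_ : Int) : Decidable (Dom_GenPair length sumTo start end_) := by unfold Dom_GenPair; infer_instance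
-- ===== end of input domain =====

-- B replaces A's product-then-filter tuple enumeration by an iterative pruned frontier,
-- and A's linear `b not in possiblePairs` scan by a seen-set.

-- ===== PORT A =====
-- itertools.product(range(start, end+1), repeat = n): leftmost coordinate varies slowest.
def prodA (r : List Int) : Nat → List (List Int)
  | 0 => [[]]
  | n + 1 => r.flatMap (fun x => (prodA r n).map (fun t => x :: t))

-- b = sorted([[1 - x, 1 - y] for x, y in zip(a, A)], reverse = True)
def mkbA (a A : List Int) : List (List Int) :=
  PySem.List.sorted ((a.zip A).map (fun p => [1 - p.1, 1 - p.2])) (fun x => x) true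

def GenPair (length : Int) (sumTo : Int) (start : Int) (end_ : Int) : List (List (List Int)) :=
  -- `length.toNat` is exact under Pre_ (0 ≤ length); Python raises ValueError for negative repeat.
  let temp := (prodA (PySem.List.pyRange start (end_ + 1) 1) length.toNat).filter
      (fun x => x.sum == sumTo)
  temp.foldl (fun acc a =>
    temp.foldl (fun acc2 A =>
      let b := mkbA a A
      if ¬ ([0, 0] ∈ b) ∧ ¬ (b ∈ acc2) then
        -- the `i` flag loop with break: i = 1 iff some B in b has b.count(B) > 1
        let i : Int := if b.any (fun B => PySem.List.count b B > 1) then 1 else 0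
        if i = 0 then acc2 ++ [b] else acc2
      else acc2) acc) []

-- ===== PORT B =====
-- iterative pruned frontier of (remaining sum, reversed prefix); Source B shares prefixes as
-- (value, parent) chains, which ARE Lean's cons lists built head-first, and the chain-walking
-- while loop plus t.reverse() materialises each chain as List.reverse
def tuplesB (length : Int) (sumTo : Int) (start : Int) (end_ : Int) : List (List Int) :=
  let frontier := (PySem.List.pyRange 0 length 1).foldl
    (fun fr j =>
      let left := length - 1 - j
      fr.flatMap (fun p =>
        (PySem.List.pyRange start (end_ + 1) 1).flatMap (fun v =>
          if left * start ≤ p.1 - v ∧ p.1 - v ≤ left * end_ then [(p.1 - v, v :: p.2)]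
          else [])))
    [(sumTo, ([] : List Int))]
  (frontier.filter (fun p => p.1 == 0)).map (fun p => p.2.reverse)

-- Source B keys `seen` by tuple(map(tuple, b)) only for hashability; equality of those keys is
-- equality of the lists b, so the Lean set holds b itself.
def GenPair_alt (length : Int) (sumTo : Int) (start : Int) (end_ : Int) : List (List (List Int)) :=
  let temp := tuplesB length sumTo start end_
  (temp.foldl (fun st a =>
    temp.foldl (fun st2 A =>
      let b := PySem.List.sorted ((a.zip A).map (fun p => [1 - p.1, 1 - p.2])) (fun x => x) true
      if st2.1.contains b then st2
      else
        let seen' := PySem.Set.add st2.1 b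
        -- len(set(key)) == len(b): no grading repeats
        if ¬ ([0, 0] ∈ b) ∧ (PySem.Set.ofList b).length = b.length then (seen', st2.2 ++ [b])
        else (seen', st2.2)) st) ((PySem.Set.empty : PySem.Set (List (List Int))), ([] : List (List (List Int))))).2

-- ===== PRECONDITION & SPEC =====
-- Pre_ excludes negative length, where A raises ValueError (itertools.product negative repeat).
def Pre_GenPair (length : Int) (sumTo : Int) (start : Int) (end_ : Int) : Prop := 0 ≤ length
instance (length : Int) (sumTo : Int) (start : Int) (end_ : Int) : Decidable (Pre_GenPair length sumTo start end_) := by unfold Pre_GenPair; infer_instance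
def pvWitness_GenPair : Int × Int × Int × Int := (2, 1, -1, 2)

def Spec_GenPair (length : Int) (sumTo : Int) (start : Int) (end_ : Int) (out : List (List (List Int))) : Prop := out = GenPair_alt length sumTo start end_
instance (length : Int) (sumTo : Int) (start : Int) (end_ : Int) (out : List (List (List Int))) : Decidable (Spec_GenPair length sumTo start end_ out) := by unfold Spec_GenPair; infer_instance

-- ===== CLAIM (what is proved, stated in full; the proofs are below) =====
def Claim_equal_GenPair : Prop := ∀ (length : Int) (sumTo : Int) (start : Int) (end_ : Int), Dom_GenPair length sumTo start end_ → Pre_GenPair length sumTo start end_ → Spec_GenPair length sumTo start end_ (GenPair length sumTo start end_)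

-- ===== LEMMAS AND PROOFS =====

-- recursive description of B's pruned frontier enumeration (proof-side only)
def tuplesR (start end_ : Int) : Nat → Int → List (List Int)
  | 0, s => if s = 0 then [[]] else []
  | m + 1, s => (PySem.List.pyRange start (end_ + 1) 1).flatMap (fun v =>
      if (m : Int) * start ≤ s - v ∧ s - v ≤ (m : Int) * end_
      then (tuplesR start end_ m (s - v)).map (fun t => v :: t) else [])

-- one frontier step of B's loop, with `left` inlined (defeq to the port's lambda)
def stepF (length start end_ : Int) (fr : List (Int × List Int)) (j : Int) : List (Int × List Int) :=
  fr.flatMap (fun p =>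
    (PySem.List.pyRange start (end_ + 1) 1).flatMap (fun v =>
      if (length - 1 - j) * start ≤ p.1 - v ∧ p.1 - v ≤ (length - 1 - j) * end_
      then [(p.1 - v, v :: p.2)] else []))

theorem prodA_sum_bounds (start end_ : Int) (m : Nat) :
    ∀ t ∈ prodA (PySem.List.pyRange start (end_ + 1) 1) m,
      (m : Int) * start ≤ t.sum ∧ t.sum ≤ (m : Int) * end_ := by
  induction m with
  | zero => intro t ht; simp [prodA] at ht; subst ht; simp
  | succ m ih =>
    intro t ht
    simp only [prodA, List.mem_flatMap, List.mem_map] at ht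
    obtain ⟨x, hx, u, hu, rfl⟩ := ht
    rw [PySem.List.mem_pyRange_one] at hx
    obtain ⟨h1, h2⟩ := ih u hu
    have hc1 : ((m + 1 : Nat) : Int) * start = (m : Int) * start + start := by push_cast; ring
    have hc2 : ((m + 1 : Nat) : Int) * end_ = (m : Int) * end_ + end_ := by push_cast; ring
    simp only [List.sum_cons]
    constructor
    · rw [hc1]; linarith [hx.1]
    · rw [hc2]; linarith [hx.2]

theorem tuplesR_eq_filter_prodA (start end_ : Int) (n : Nat) (s : Int) :
    tuplesR start end_ n s
      = (prodA (PySem.List.pyRange start (end_ + 1) 1) n).filter (fun x => x.sum == s) := by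
  induction n generalizing s with
  | zero =>
    rw [tuplesR]
    by_cases h : s = 0
    · simp [prodA, h]
    · have h0 : (List.sum ([] : List Int) == s) = false := by
        simp only [List.sum_nil, beq_eq_false_iff_ne]; omega
      simp [prodA, h]
      omega
  | succ n ih =>
    rw [tuplesR]
    simp only [prodA, List.filter_flatMap, List.filter_map]
    refine List.flatMap_congr ?_
    intro v _
    by_cases hg : (n : Int) * start ≤ s - v ∧ s - v ≤ (n : Int) * end_
    · rw [if_pos hg, ih (s - v)]
      congr 1
      apply List.filter_congr
      intro t _
      show (t.sum == s - v) = ((fun x => List.sum x == s) (v :: t))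
      simp only [List.sum_cons]
      rcases eq_or_ne t.sum (s - v) with h | h
      · simp [h]
      · have h2 : v + t.sum ≠ s := by omega
        simp [h, h2]
    · rw [if_neg hg]
      symm
      simp only [List.map_eq_nil_iff, List.filter_eq_nil_iff]
      intro t ht
      have hb := prodA_sum_bounds start end_ n t ht
      simp only [Function.comp_apply, List.sum_cons, beq_iff_eq]
      intro heq
      have hts : t.sum = s - v := by omega
      rw [hts] at hb
      exact hg hb

theorem filter_map_eq_flatMap {α β : Type} (q : α → Bool) (f : α → β) (F : List α) :
    (F.filter q).map f = F.flatMap (fun p => if q p then [f p] else []) := by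
  induction F with
  | nil => rfl
  | cons p F ih => by_cases h : q p <;> simp [h, ih]

-- the frontier loop from position j with m positions left, finalised, is the recursive
-- enumeration glued onto each frontier entry's materialised prefix
theorem frontier_loop (length start end_ : Int) (m : Nat) :
    ∀ (j : Int) (F : List (Int × List Int)), j + m = length →
      ((((PySem.List.pyRange j length 1).foldl (stepF length start end_) F).filter
          (fun p => p.1 == 0)).map (fun p => p.2.reverse))
        = F.flatMap (fun p => (tuplesR start end_ m p.1).map (fun t => p.2.reverse ++ t)) := by
  induction m with
  | zero =>
    intro j F hj
    rw [PySem.List.pyRange_one_eq_nil (by omega)]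
    simp only [List.foldl_nil]
    rw [filter_map_eq_flatMap]
    refine List.flatMap_congr ?_
    intro p _
    by_cases h : p.1 = 0 <;> simp [tuplesR, h]
  | succ m ih =>
    intro j F hj
    rw [PySem.List.pyRange_one_cons (by omega : j < length)]
    simp only [List.foldl_cons]
    rw [ih (j + 1) (stepF length start end_ F j) (by omega)]
    unfold stepF
    rw [List.flatMap_assoc]
    refine List.flatMap_congr ?_
    intro p _
    rw [List.flatMap_assoc]
    show _ = (tuplesR start end_ (m + 1) p.1).map (fun t => p.2.reverse ++ t)
    rw [tuplesR]
    rw [List.map_flatMap]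
    refine List.flatMap_congr ?_
    intro v _
    have hleft : length - 1 - j = (m : Int) := by omega
    rw [hleft]
    by_cases hg : (m : Int) * start ≤ p.1 - v ∧ p.1 - v ≤ (m : Int) * end_
    · rw [if_pos hg, if_pos hg]
      simp only [List.flatMap_cons, List.flatMap_nil, List.append_nil, List.map_map]
      refine List.map_congr_left (fun t _ => ?_)
      simp [List.reverse_cons, List.append_assoc]
    · rw [if_neg hg, if_neg hg]
      simp

theorem tuplesB_eq_filter_prodA (start end_ : Int) (n : Nat) (s : Int) :
    tuplesB (n : Int) s start end_
      = (prodA (PySem.List.pyRange start (end_ + 1) 1) n).filter (fun x => x.sum == s) := by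
  have h : tuplesB (n : Int) s start end_
      = ((((PySem.List.pyRange 0 (n : Int) 1).foldl (stepF (n : Int) start end_)
            [(s, ([] : List Int))]).filter (fun p => p.1 == 0)).map (fun p => p.2.reverse)) := rfl
  rw [h, frontier_loop (n : Int) start end_ n 0 [(s, ([] : List Int))] (by omega)]
  simp [tuplesR_eq_filter_prodA]

-- the two loop bodies of the main pass, named for the equivalence induction
def stepA (acc2 : List (List (List Int))) (b : List (List Int)) : List (List (List Int)) :=
  if ¬ ([0, 0] ∈ b) ∧ ¬ (b ∈ acc2) then
    let i : Int := if b.any (fun B => PySem.List.count b B > 1) then 1 else 0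
    if i = 0 then acc2 ++ [b] else acc2
  else acc2

def stepB (st2 : PySem.Set (List (List Int)) × List (List (List Int))) (b : List (List Int)) :
    PySem.Set (List (List Int)) × List (List (List Int)) :=
  if st2.1.contains b then st2
  else
    let seen' := PySem.Set.add st2.1 b
    if ¬ ([0, 0] ∈ b) ∧ (PySem.Set.ofList b).length = b.length then (seen', st2.2 ++ [b])
    else (seen', st2.2)

def okB (b : List (List Int)) : Prop := ¬ ([0, 0] ∈ b) ∧ b.Nodup

theorem set_ofList_sublist {α : Type} [BEq α] [LawfulBEq α] (xs : List α) :
    ∀ (s ys : List α), s.Sublist ys → (xs.foldl PySem.Set.add s).Sublist (ys ++ xs) := by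
  induction xs with
  | nil => intro s ys h; simpa using h
  | cons x xs ih =>
    intro s ys h
    have h2 : (PySem.Set.add s x).Sublist (ys ++ [x]) := by
      unfold PySem.Set.add
      split
      · exact h.trans (List.sublist_append_left ys [x])
      · exact h.append (List.Sublist.refl [x])
    simpa using ih (PySem.Set.add s x) (ys ++ [x]) h2

theorem ofList_sublist {α : Type} [BEq α] [LawfulBEq α] (xs : List α) :
    (PySem.Set.ofList xs).Sublist xs := by
  have := set_ofList_sublist xs [] [] (List.Sublist.refl [])
  rwa [PySem.Set.ofList_eq_foldl]

theorem lenSet_iff_nodup (b : List (List Int)) :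
    (PySem.Set.ofList b).length = b.length ↔ b.Nodup := by
  constructor
  · intro h
    have := (ofList_sublist b).eq_of_length h
    rw [← this]; exact PySem.Set.nodup_ofList b
  · intro h
    rw [PySem.Set.ofList_eq_self_of_nodup b h]

theorem any_count_iff_not_nodup (b : List (List Int)) :
    (b.any (fun B => PySem.List.count b B > 1)) = true ↔ ¬ b.Nodup := by
  rw [List.nodup_iff_count_le_one]
  simp only [List.any_eq_true, decide_eq_true_eq, PySem.List.count_eq, not_forall]
  constructor
  · rintro ⟨B, _, hc⟩; exact ⟨B, by omega⟩
  · rintro ⟨B, hc⟩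
    refine ⟨B, ?_, by omega⟩
    rw [← List.count_pos_iff]; omega

theorem stepA_of_ok (acc : List (List (List Int))) (b : List (List Int))
    (hok : okB b) (hacc : b ∉ acc) : stepA acc b = acc ++ [b] := by
  unfold stepA
  rw [if_pos ⟨hok.1, hacc⟩]
  have h : (b.any (fun B => PySem.List.count b B > 1)) = false := by
    rw [← Bool.not_eq_true, any_count_iff_not_nodup]; exact not_not_intro hok.2
  simp only [h, Bool.false_eq_true, if_false]
  norm_num

theorem stepA_of_not_ok (acc : List (List (List Int))) (b : List (List Int))
    (hok : ¬ okB b) : stepA acc b = acc := by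
  unfold stepA
  by_cases h00 : [0, 0] ∈ b
  · rw [if_neg (by simp [h00])]
  · have hnd : ¬ b.Nodup := fun hnd => hok ⟨h00, hnd⟩
    have h : (b.any (fun B => PySem.List.count b B > 1)) = true :=
      (any_count_iff_not_nodup b).2 hnd
    by_cases hacc : b ∈ acc
    · rw [if_neg (by simp [hacc])]
    · rw [if_pos ⟨h00, hacc⟩]
      simp only [h, if_true]
      norm_num

theorem stepA_of_mem (acc : List (List (List Int))) (b : List (List Int))
    (hacc : b ∈ acc) : stepA acc b = acc := by
  unfold stepA
  rw [if_neg (by simp [hacc])]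

theorem stepB_of_seen (seen : PySem.Set (List (List Int))) (out : List (List (List Int)))
    (b : List (List Int)) (h : b ∈ seen) : stepB (seen, out) b = (seen, out) := by
  unfold stepB
  rw [(PySem.Set.contains_iff seen b).2 h, if_pos rfl]

theorem stepB_of_fresh_ok (seen : PySem.Set (List (List Int))) (out : List (List (List Int)))
    (b : List (List Int)) (h : b ∉ seen) (hok : okB b) :
    stepB (seen, out) b = (PySem.Set.add seen b, out ++ [b]) := by
  unfold stepB
  have hcon : seen.contains b = false := by
    by_contra hc
    exact h ((PySem.Set.contains_iff seen b).1 (by simpa using hc))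
  rw [hcon, if_neg (by simp)]
  rw [if_pos ⟨hok.1, (lenSet_iff_nodup b).2 hok.2⟩]

theorem stepB_of_fresh_not_ok (seen : PySem.Set (List (List Int))) (out : List (List (List Int)))
    (b : List (List Int)) (h : b ∉ seen) (hok : ¬ okB b) :
    stepB (seen, out) b = (PySem.Set.add seen b, out) := by
  unfold stepB
  have hcon : seen.contains b = false := by
    by_contra hc
    exact h ((PySem.Set.contains_iff seen b).1 (by simpa using hc))
  rw [hcon, if_neg (by simp)]
  rw [if_neg ?_]
  rintro ⟨h00, hlen⟩
  exact hok ⟨h00, (lenSet_iff_nodup b).1 hlen⟩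

-- loop invariant: A's accumulator is B's output list, and A's accumulator holds exactly
-- the already-seen b's that pass the test.
theorem loop_equiv (bs : List (List (List Int))) :
    ∀ (acc : List (List (List Int))) (seen : PySem.Set (List (List Int)))
      (out : List (List (List Int))),
      acc = out →
      (∀ x, x ∈ acc ↔ x ∈ seen ∧ okB x) →
      bs.foldl stepA acc = (bs.foldl stepB (seen, out)).2 := by
  induction bs with
  | nil => intro acc seen out h1 _; simpa using h1
  | cons b bs ih =>
    intro acc seen out h1 h2
    simp only [List.foldl_cons]
    by_cases hmem : b ∈ seen
    · rw [stepB_of_seen seen out b hmem]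
      by_cases hok : okB b
      · rw [stepA_of_mem acc b ((h2 b).2 ⟨hmem, hok⟩)]
        exact ih acc seen out h1 h2
      · rw [stepA_of_not_ok acc b hok]
        exact ih acc seen out h1 h2
    · have hacc : b ∉ acc := fun h => hmem ((h2 b).1 h).1
      by_cases hok : okB b
      · rw [stepA_of_ok acc b hok hacc, stepB_of_fresh_ok seen out b hmem hok]
        refine ih (acc ++ [b]) (PySem.Set.add seen b) (out ++ [b]) (by rw [h1]) ?_
        intro x
        rw [List.mem_append, h2 x, PySem.Set.mem_add]
        constructor
        · rintro (⟨hs, hokx⟩ | hx)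
          · exact ⟨Or.inl hs, hokx⟩
          · simp only [List.mem_singleton] at hx
            subst hx; exact ⟨Or.inr rfl, hok⟩
        · rintro ⟨hs | hs, hokx⟩
          · exact Or.inl ⟨hs, hokx⟩
          · subst hs; simp
      · rw [stepA_of_not_ok acc b hok, stepB_of_fresh_not_ok seen out b hmem hok]
        refine ih acc (PySem.Set.add seen b) out h1 ?_
        intro x
        rw [h2 x, PySem.Set.mem_add]
        constructor
        · rintro ⟨hs, hokx⟩; exact ⟨Or.inl hs, hokx⟩
        · rintro ⟨hs | hs, hokx⟩
          · exact ⟨hs, hokx⟩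
          · subst hs; exact absurd hokx hok

-- nested fold over temp × temp = fold over the stream of generated b's
theorem nested_foldl_eq_stream {γ : Type} (temp : List (List Int))
    (mk : List Int → List Int → List (List Int)) (g : γ → List (List Int) → γ) (init : γ) :
    temp.foldl (fun acc a => temp.foldl (fun acc2 A => g acc2 (mk a A)) acc) init
      = (temp.flatMap (fun a => temp.map (fun A => mk a A))).foldl g init := by
  rw [List.foldl_flatMap]
  refine List.foldl_ext _ _ init (fun acc a _ => ?_)
  rw [List.foldl_map]

-- the two ports, rewritten as a single fold over the stream (defeq `show` casts the ports'
-- let-bound lambdas to stepA/stepB)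
theorem GenPair_eq (length sumTo start end_ : Int) :
    GenPair length sumTo start end_
      = (((prodA (PySem.List.pyRange start (end_ + 1) 1) length.toNat).filter
            (fun x => x.sum == sumTo)).flatMap
          (fun a => ((prodA (PySem.List.pyRange start (end_ + 1) 1) length.toNat).filter
            (fun x => x.sum == sumTo)).map (fun A => mkbA a A))).foldl stepA [] := by
  show ((prodA (PySem.List.pyRange start (end_ + 1) 1) length.toNat).filter
      (fun x => x.sum == sumTo)).foldl
      (fun acc a => ((prodA (PySem.List.pyRange start (end_ + 1) 1) length.toNat).filter
        (fun x => x.sum == sumTo)).foldl (fun acc2 A => stepA acc2 (mkbA a A)) acc) [] = _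
  exact nested_foldl_eq_stream _ _ _ _

theorem GenPair_alt_eq (length sumTo start end_ : Int) :
    GenPair_alt length sumTo start end_
      = (((tuplesB length sumTo start end_).flatMap
          (fun a => (tuplesB length sumTo start end_).map (fun A => mkbA a A))).foldl stepB
            ((PySem.Set.empty : PySem.Set (List (List Int))), ([] : List (List (List Int))))).2 := by
  show ((tuplesB length sumTo start end_).foldl
      (fun st a => (tuplesB length sumTo start end_).foldl
        (fun st2 A => stepB st2 (mkbA a A)) st)
      ((PySem.Set.empty : PySem.Set (List (List Int))), ([] : List (List (List Int))))).2 = _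
  rw [nested_foldl_eq_stream _ _ _ _]

-- ===== VERDICT (by name: the statement is the Claim_ definition above) =====
theorem GenPair_spec : Claim_equal_GenPair := by
  intro length sumTo start end_ _ hpre
  unfold Spec_GenPair
  rw [GenPair_eq, GenPair_alt_eq]
  have hlen : length = ((length.toNat : Nat) : Int) := by
    unfold Pre_GenPair at hpre; omega
  rw [hlen, tuplesB_eq_filter_prodA, Int.toNat_natCast]
  exact loop_equiv _ [] PySem.Set.empty [] rfl (by intro x; simp [PySem.Set.empty])
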